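-- pv_equiv track=rewrite | github.com/weed478/wdi6 | zad01.py | myszka
-- ===== SOURCE A (Python) =====
-- def myszka(num, min_len, min_cut):
--     def ultimyszka(number=0, pos=0, depth=0):
--         space_after = min_cut - 1 - depth
--         for a in range(pos, len(num_tab) - max(0, space_after)):
--             new_number = number * 10 + num_tab[len(num_tab) - a - 1]
--             if depth >= min_len - 1:
--                 yield new_number
--
--             if space_after >= 0 or a + 1 < len(num_tab):
--                 if depth + 1 < len(num_tab) - min_cut:
--                     for i in ultimyszka(new_number, a + 1, depth + 1):
--                         yield i
--
--     num_tab = []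
--     while num > 0:
--         num, r = divmod(num, 10)
--         num_tab.append(r)
--
--     if len(num_tab) > 0 and len(num_tab) >= min_len > 0 and len(num_tab) - min_len >= min_cut >= 0:
--         return ultimyszka()
-- ===== SOURCE B (Python) =====
-- def myszka(num, min_len, min_cut):
--     # Iterative re-implementation: explicit-stack pre-order DFS generator instead of
--     # nested recursive generators; same yield order, same outer guard (returns None).
--     num_tab = []
--     while num > 0:
--         num, r = divmod(num, 10)
--         num_tab.append(r)
--     n = len(num_tab)
--
--     if not (n > 0 and n >= min_len > 0 and n - min_len >= min_cut >= 0):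
--         return None
--
--     def run():
--         stack = [(0, 0, 0)]  # frames: (number, a, depth)
--         while stack:
--             number, a, depth = stack.pop()
--             space_after = min_cut - 1 - depth
--             if a >= n - max(0, space_after):
--                 continue  # this frame's loop is exhausted
--             new_number = number * 10 + num_tab[n - a - 1]
--             if depth >= min_len - 1:
--                 yield new_number
--             # resume this frame at a+1 after the child (if any) is done
--             stack.append((number, a + 1, depth))
--             if (space_after >= 0 or a + 1 < n) and depth + 1 < n - min_cut:
--                 stack.append((new_number, a + 1, depth + 1))
--
--     return run()
-- ===== Notes on version B (the rewrite author's own statement) =====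
-- stated objective: alternative
-- what changed: The nested recursive generator (a generator that recursively delegates to itself for each chosen digit) is replaced by a single iterative generator driven by an explicit stack of (number, position, depth) frames that reproduces the same pre-order DFS and yield order.
import Mathlib
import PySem

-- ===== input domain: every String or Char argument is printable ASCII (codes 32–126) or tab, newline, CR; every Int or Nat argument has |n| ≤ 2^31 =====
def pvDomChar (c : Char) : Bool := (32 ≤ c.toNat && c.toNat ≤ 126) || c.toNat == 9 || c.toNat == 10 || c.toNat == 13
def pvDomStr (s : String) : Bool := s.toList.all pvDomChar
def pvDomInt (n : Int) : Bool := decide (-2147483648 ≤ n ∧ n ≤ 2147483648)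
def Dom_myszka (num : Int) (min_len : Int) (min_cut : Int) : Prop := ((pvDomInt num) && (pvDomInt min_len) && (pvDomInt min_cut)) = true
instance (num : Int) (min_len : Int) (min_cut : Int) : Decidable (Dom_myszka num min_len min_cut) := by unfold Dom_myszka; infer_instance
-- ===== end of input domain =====

-- B replaces A's nested recursive generators by a single explicit-stack pre-order DFS loop (alternative decomposition, same cost).


-- ===== PORT A =====
-- the 'while num > 0: num, r = divmod(num, 10); num_tab.append(r)' loop (identical in A and in B)
-- termination lemma for the digit loop (cited by pvNumTabGo's decreasing_by)
theorem pvDigitsDec (num : Int) (h : num > 0) : (PySem.Int.floordiv num 10).toNat < num.toNat := by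
  rw [PySem.Int.floordiv_eq_ediv_of_pos (by omega : (0:Int) < 10)]; omega

def pvNumTabGo (num : Int) (acc : List Int) : List Int :=
  if num > 0 then
    pvNumTabGo (PySem.Int.floordiv num 10) (acc ++ [PySem.Int.mod num 10])
  else acc
termination_by num.toNat
decreasing_by exact pvDigitsDec _ ‹_›

def pvNumTab (num : Int) : List Int := pvNumTabGo num []

-- the recursive generator 'ultimyszka(number, pos, depth)', unrolled over its own
-- for-loop counter a (the recursive call at a is the loop continuation at a+1).
-- num_tab[len - a - 1] is ported with pyGetD _ _ 0: in every reachable call 0 ≤ a < len,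
-- so the index is always in range and the default is never used.
-- termination lemma for the loop counter a (cited by pvUlti's decreasing_by)
theorem pvUltiDec (L a m : Int) (h : a < L - max 0 m) :
    ((L + 1) - (a + 1)).toNat < ((L + 1) - a).toNat := by
  have := le_max_left (0 : Int) m
  omega

def pvUlti (tab : List Int) (min_len : Int) (min_cut : Int)
    (number : Int) (a : Int) (depth : Int) : List Int :=
  let space_after := min_cut - 1 - depth
  if a < (tab.length : Int) - max 0 space_after then
    let new_number := number * 10 + PySem.List.pyGetD tab ((tab.length : Int) - a - 1) 0
    (if depth ≥ min_len - 1 then [new_number] else []) ++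
    ((if (space_after ≥ 0 ∨ a + 1 < (tab.length : Int)) ∧ depth + 1 < (tab.length : Int) - min_cut
        then pvUlti tab min_len min_cut new_number (a + 1) (depth + 1) else []) ++
      pvUlti tab min_len min_cut number (a + 1) depth)
  else []
termination_by ((tab.length : Int) + 1 - a).toNat
decreasing_by
  all_goals exact pvUltiDec _ _ (min_cut - 1 - depth) (by assumption)

def myszka (num : Int) (min_len : Int) (min_cut : Int) : Option (List Int) :=
  let tab := pvNumTab num
  if 0 < (tab.length : Int) ∧ ((tab.length : Int) ≥ min_len ∧ min_len > 0) ∧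
      ((tab.length : Int) - min_len ≥ min_cut ∧ min_cut ≥ 0) then
    some (pvUlti tab min_len min_cut 0 0 0)
  else none

-- ===== PORT B =====
-- explicit-stack DFS: pop a frame (number, a, depth); if its loop is exhausted, drop it;
-- otherwise emit, push the resumed parent frame, then the child frame (popped first).
-- Stack head = top of stack; same pyGetD remark as in port A.
-- termination lemmas for the stack measure (cited by pvRunB's decreasing_by)
theorem pvStackDecDrop (w s : Nat) (h : 0 < w) : s < w + s := Nat.lt_add_of_pos_left h

theorem pvStackDecOne (L a m : Int) (s : Nat) (h : ¬ a ≥ L - max 0 m) :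
    3 ^ ((L + 1) - (a + 1)).toNat + s < 3 ^ ((L + 1) - a).toNat + s := by
  have hmax := le_max_left (0 : Int) m
  have hk : ((L + 1) - a).toNat = ((L + 1) - (a + 1)).toNat + 1 := by omega
  rw [hk, pow_succ]
  have := Nat.pow_pos (n := ((L + 1) - (a + 1)).toNat) (show 0 < 3 by decide)
  omega

theorem pvStackDecTwo (L a m : Int) (s : Nat) (h : ¬ a ≥ L - max 0 m) :
    3 ^ ((L + 1) - (a + 1)).toNat + (3 ^ ((L + 1) - (a + 1)).toNat + s)
      < 3 ^ ((L + 1) - a).toNat + s := by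
  have hmax := le_max_left (0 : Int) m
  have hk : ((L + 1) - a).toNat = ((L + 1) - (a + 1)).toNat + 1 := by omega
  rw [hk, pow_succ]
  have := Nat.pow_pos (n := ((L + 1) - (a + 1)).toNat) (show 0 < 3 by decide)
  omega

def pvRunB (tab : List Int) (min_len : Int) (min_cut : Int)
    (stack : List (Int × Int × Int)) : List Int :=
  match stack with
  | [] => []
  | (number, a, depth) :: rest =>
    let space_after := min_cut - 1 - depth
    if a ≥ (tab.length : Int) - max 0 space_after then
      pvRunB tab min_len min_cut rest
    else
      let new_number := number * 10 + PySem.List.pyGetD tab ((tab.length : Int) - a - 1) 0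
      (if depth ≥ min_len - 1 then [new_number] else []) ++
      pvRunB tab min_len min_cut
        ((if (space_after ≥ 0 ∨ a + 1 < (tab.length : Int)) ∧ depth + 1 < (tab.length : Int) - min_cut
            then [(new_number, a + 1, depth + 1)] else []) ++ (number, a + 1, depth) :: rest)
termination_by (stack.map (fun f => 3 ^ (((tab.length : Int) + 1 - f.2.1).toNat))).sum
decreasing_by
  · simp only [List.map_cons, List.sum_cons]
    exact pvStackDecDrop _ _ (Nat.pow_pos (by decide))
  · split
    · simp only [List.map_cons, List.sum_cons, List.map_append, List.sum_append,
        List.map_nil, List.sum_nil]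
      exact pvStackDecTwo _ _ (min_cut - 1 - depth) _ (by assumption)
    · simp only [List.map_cons, List.sum_cons, List.nil_append]
      exact pvStackDecOne _ _ (min_cut - 1 - depth) _ (by assumption)

def myszka_alt (num : Int) (min_len : Int) (min_cut : Int) : Option (List Int) :=
  let tab := pvNumTab num
  if 0 < (tab.length : Int) ∧ ((tab.length : Int) ≥ min_len ∧ min_len > 0) ∧
      ((tab.length : Int) - min_len ≥ min_cut ∧ min_cut ≥ 0) then
    some (pvRunB tab min_len min_cut [(0, 0, 0)])
  else none

-- ===== PRECONDITION & SPEC =====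
def Spec_myszka (num : Int) (min_len : Int) (min_cut : Int) (out : Option (List Int)) : Prop := out = myszka_alt num min_len min_cut
instance (num : Int) (min_len : Int) (min_cut : Int) (out : Option (List Int)) : Decidable (Spec_myszka num min_len min_cut out) := by unfold Spec_myszka; infer_instance

-- ===== CLAIM (what is proved, stated in full; the proofs are below) =====
def Claim_equal_myszka : Prop := ∀ (num : Int) (min_len : Int) (min_cut : Int), Dom_myszka num min_len min_cut → Spec_myszka num min_len min_cut (myszka num min_len min_cut)

-- ===== LEMMAS AND PROOFS =====

-- the stack machine computes, frame by frame, the concatenation of A's generators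
theorem pvRunB_eq_flatten (tab : List Int) (min_len min_cut : Int) (stack : List (Int × Int × Int)) :
    pvRunB tab min_len min_cut stack
      = (stack.map (fun f => pvUlti tab min_len min_cut f.1 f.2.1 f.2.2)).flatten := by
  fun_induction pvRunB tab min_len min_cut stack with
  | case1 => simp
  | case2 number a depth rest sa h ih =>
    have hz : pvUlti tab min_len min_cut number a depth = [] := by
      rw [pvUlti.eq_def]; dsimp only; rw [if_neg (by omega)]
    rw [ih, List.map_cons, List.flatten_cons, hz, List.nil_append]
  | case3 number a depth rest sa h nn ih =>
    have hu : pvUlti tab min_len min_cut number a depth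
        = (if depth ≥ min_len - 1 then [nn] else []) ++
          ((if (sa ≥ 0 ∨ a + 1 < (tab.length : Int)) ∧ depth + 1 < (tab.length : Int) - min_cut
              then pvUlti tab min_len min_cut nn (a + 1) (depth + 1) else []) ++
            pvUlti tab min_len min_cut number (a + 1) depth) := by
      rw [pvUlti.eq_def]; dsimp only; rw [if_pos (by omega)]
    simp only [dite_eq_ite] at ih
    by_cases hc : ((sa ≥ 0 ∨ a + 1 < (tab.length : Int)) ∧ depth + 1 < (tab.length : Int) - min_cut)
    · rw [if_pos hc] at ih ⊢
      rw [ih]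
      conv_rhs => rw [List.map_cons, List.flatten_cons, hu, if_pos hc]
      simp [List.append_assoc]
    · rw [if_neg hc] at ih ⊢
      rw [ih]
      conv_rhs => rw [List.map_cons, List.flatten_cons, hu, if_neg hc]
      simp [List.append_assoc]

-- ===== VERDICT (by name: the statement is the Claim_ definition above) =====
theorem myszka_spec : Claim_equal_myszka := by
  intro num min_len min_cut _
  unfold Spec_myszka
  simp only [myszka, myszka_alt]
  split_ifs
  · rw [pvRunB_eq_flatten]
    simp
  · rfl
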